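-- pv_equiv track=rewrite | github.com/TarferSoul/medical-safety-mllm | data_processing/normalize_reports_v2.py | json_to_report
-- ===== SOURCE A (Python) =====
-- def json_to_report(structured_json: dict) -> str:
--     """Stage 3: Generate normalized report from verified JSON."""
--
--     sections = []
--     sections.append("FINAL REPORT")
--
--     if structured_json.get("wet_read"):
--         sections.append(f"WET READ: {structured_json['wet_read']}")
--         sections.append("" + "_" * 78)
--
--     # Format each section
--     if structured_json.get("examination"):
--         sections.append(f"EXAMINATION: {structured_json['examination']}")
--     else:
--         sections.append("EXAMINATION: Not specified.")
--
--     sections.append("")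
--
--     if structured_json.get("indication"):
--         sections.append(f"INDICATION: {structured_json['indication']}")
--     else:
--         sections.append("INDICATION: Not specified.")
--
--     sections.append("")
--
--     if structured_json.get("technique"):
--         sections.append(f"TECHNIQUE: {structured_json['technique']}")
--     else:
--         sections.append("TECHNIQUE: Not specified.")
--
--     sections.append("")
--
--     if structured_json.get("comparison"):
--         sections.append(f"COMPARISON: {structured_json['comparison']}")
--     else:
--         sections.append("COMPARISON: None.")
--
--     sections.append("")
--     sections.append("FINDINGS:")
--     sections.append("")
--
--     if structured_json.get("findings"):
--         # Add indentation to findings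
--         findings_lines = structured_json['findings'].split('\n')
--         for line in findings_lines:
--             sections.append(f"{line}")
--     else:
--         sections.append("Not specified.")
--
--     sections.append("")
--     sections.append("IMPRESSION:")
--     sections.append("")
--
--     if structured_json.get("impression"):
--         # Add indentation to impression
--         impression_lines = structured_json['impression'].split('\n')
--         for line in impression_lines:
--             sections.append(f"{line}")
--     else:
--         sections.append("Not specified.")
--
--     return '\n'.join(sections)
-- ===== SOURCE B (Python) =====
-- def json_to_report(structured_json: dict) -> str:
--     """Stage 3: Generate normalized report from verified JSON."""
--     g = structured_json.get
--     head = "FINAL REPORT"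
--     if g("wet_read"):
--         head += "\nWET READ: " + structured_json["wet_read"] + "\n" + "_" * 78
--     paras = [label + ": " + (g(label.lower()) or default)
--              for label, default in (("EXAMINATION", "Not specified."),
--                                     ("INDICATION", "Not specified."),
--                                     ("TECHNIQUE", "Not specified."),
--                                     ("COMPARISON", "None."))]
--     paras += ["FINDINGS:", g("findings") or "Not specified.",
--               "IMPRESSION:", g("impression") or "Not specified."]
--     return head + "\n" + "\n\n".join(paras)
-- ===== Notes on version B (the rewrite author's own statement) =====
-- stated objective: simpler
-- what changed: A appends sections one by one (including blank separator lines) into a list, splits findings/impression on '\n' only to re-join them, and joins everything with '\n'; B builds a head string plus eight paragraph strings and joins the paragraphs once with '\n\n', appending the findings/impression text directly.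
import Mathlib
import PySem

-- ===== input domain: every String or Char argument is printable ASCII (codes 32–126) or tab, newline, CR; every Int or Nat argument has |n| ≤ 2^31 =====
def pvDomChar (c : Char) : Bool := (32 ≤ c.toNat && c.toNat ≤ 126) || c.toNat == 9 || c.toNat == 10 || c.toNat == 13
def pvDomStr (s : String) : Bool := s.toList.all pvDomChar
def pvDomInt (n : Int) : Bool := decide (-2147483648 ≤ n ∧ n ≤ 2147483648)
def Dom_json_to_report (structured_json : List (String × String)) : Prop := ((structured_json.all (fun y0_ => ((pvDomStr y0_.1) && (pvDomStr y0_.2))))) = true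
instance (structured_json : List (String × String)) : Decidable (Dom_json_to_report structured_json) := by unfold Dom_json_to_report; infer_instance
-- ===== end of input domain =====

-- B replaces A's append-by-append section list (with its split-then-reattach loops over
-- findings/impression) by a head string plus eight paragraphs joined once with "\n\n" (objective: simpler).

-- ===== PORT A =====
-- truthiness of `structured_json.get(k)` (None and "" are falsy) — the dict-get idiom both Pythons use
def pvTruthy (o : Option String) : Bool :=
  match o with
  | some s => s != ""
  | none => false

-- s.split('\n'): the separator "\n" is non-empty, so Python's split is exactly Chars.splitOn
def pvSplitNL (s : String) : List String :=
  (PySem.Chars.splitOn s.toList ['\n']).map String.ofList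

def json_to_report (structured_json : List (String × String)) : String :=
  let get := fun (k : String) => List.lookup k structured_json
  let sections : List String := ["FINAL REPORT"]
  let sections :=
    if pvTruthy (get "wet_read") then
      (sections ++ ["WET READ: " ++ (get "wet_read").getD ""]) ++
        ["" ++ String.ofList (List.replicate 78 '_')]
    else sections
  let sections :=
    if pvTruthy (get "examination") then sections ++ ["EXAMINATION: " ++ (get "examination").getD ""]
    else sections ++ ["EXAMINATION: Not specified."]
  let sections := sections ++ [""]
  let sections :=
    if pvTruthy (get "indication") then sections ++ ["INDICATION: " ++ (get "indication").getD ""]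
    else sections ++ ["INDICATION: Not specified."]
  let sections := sections ++ [""]
  let sections :=
    if pvTruthy (get "technique") then sections ++ ["TECHNIQUE: " ++ (get "technique").getD ""]
    else sections ++ ["TECHNIQUE: Not specified."]
  let sections := sections ++ [""]
  let sections :=
    if pvTruthy (get "comparison") then sections ++ ["COMPARISON: " ++ (get "comparison").getD ""]
    else sections ++ ["COMPARISON: None."]
  let sections := sections ++ [""]
  let sections := sections ++ ["FINDINGS:"]
  let sections := sections ++ [""]
  let sections :=
    if pvTruthy (get "findings") then
      (pvSplitNL ((get "findings").getD "")).foldl (fun acc line => acc ++ [line]) sections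
    else sections ++ ["Not specified."]
  let sections := sections ++ [""]
  let sections := sections ++ ["IMPRESSION:"]
  let sections := sections ++ [""]
  let sections :=
    if pvTruthy (get "impression") then
      (pvSplitNL ((get "impression").getD "")).foldl (fun acc line => acc ++ [line]) sections
    else sections ++ ["Not specified."]
  PySem.Str.join "\n" sections

-- ===== PORT B =====
-- Python's `structured_json.get(k) or default`
def pvOr (o : Option String) (d : String) : String :=
  if pvTruthy o then o.getD "" else d

def json_to_report_alt (structured_json : List (String × String)) : String :=
  let g := fun (k : String) => List.lookup k structured_json
  let head := "FINAL REPORT"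
  let head :=
    if pvTruthy (g "wet_read") then
      head ++ "\nWET READ: " ++ (g "wet_read").getD "" ++ "\n" ++
        String.ofList (List.replicate 78 '_')
    else head
  let paras :=
    [("EXAMINATION", "Not specified."), ("INDICATION", "Not specified."),
     ("TECHNIQUE", "Not specified."), ("COMPARISON", "None.")].map
      (fun p => p.1 ++ ": " ++ pvOr (g (PySem.Str.lower p.1)) p.2)
  let paras := paras ++ ["FINDINGS:", pvOr (g "findings") "Not specified.",
                         "IMPRESSION:", pvOr (g "impression") "Not specified."]
  head ++ "\n" ++ PySem.Str.join "\n\n" paras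

-- ===== PRECONDITION & SPEC =====
def Spec_json_to_report (structured_json : List (String × String)) (out : String) : Prop := out = json_to_report_alt structured_json
instance (structured_json : List (String × String)) (out : String) : Decidable (Spec_json_to_report structured_json out) := by unfold Spec_json_to_report; infer_instance

-- ===== CLAIM (what is proved, stated in full; the proofs are below) =====
def Claim_equal_json_to_report : Prop := ∀ (structured_json : List (String × String)), Dom_json_to_report structured_json → Spec_json_to_report structured_json (json_to_report structured_json)

-- ===== LEMMAS AND PROOFS =====

-- reference single-character splitter; PySem.Chars.splitOn's fuelled loop computes it
def mySplit (c : Char) (pre : List Char) : List Char → List (List Char)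
  | [] => [pre]
  | x :: rest => if x = c then pre :: mySplit c [] rest else mySplit c (pre ++ [x]) rest

lemma mySplit_ne_nil (c : Char) (pre l : List Char) : mySplit c pre l ≠ [] := by
  induction l generalizing pre with
  | nil => simp [mySplit]
  | cons x rest ih =>
    simp only [mySplit]
    split
    · simp
    · exact ih _

lemma go_eq_mySplit (c : Char) :
    ∀ (fuel : Nat) (l cur : List Char) (acc : List (List Char)), l.length < fuel →
      PySem.Chars.splitOn.go [c] fuel l cur acc = acc.reverse ++ mySplit c cur.reverse l := by
  intro fuel
  induction fuel with
  | zero => intro l cur acc h; omega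
  | succ n ih =>
    intro l cur acc h
    cases l with
    | nil =>
      rw [PySem.Chars.splitOn.go.eq_def]
      simp [mySplit]
    | cons x rest =>
      rw [PySem.Chars.splitOn.go.eq_def]
      simp only [List.isPrefixOf, List.length_cons] at *
      by_cases hx : c = x
      · subst hx
        simp only [beq_self_eq_true, Bool.true_and]
        rw [if_pos (by simp)]
        rw [ih _ _ _ (by simpa using Nat.lt_of_succ_lt_succ h)]
        simp [mySplit]
      · rw [if_neg (by simp [hx])]
        rw [ih _ _ _ (by omega)]
        simp only [mySplit]
        rw [if_neg (fun h => hx h.symm)]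
        simp

lemma splitOn_eq_mySplit (c : Char) (l : List Char) :
    PySem.Chars.splitOn l [c] = mySplit c [] l := by
  unfold PySem.Chars.splitOn
  rw [go_eq_mySplit c _ _ _ _ (by omega)]
  simp

lemma inter_cons (sep a : List Char) (ls : List (List Char)) (h : ls ≠ []) :
    sep.intercalate (a :: ls) = a ++ sep ++ sep.intercalate ls := by
  cases ls with
  | nil => exact absurd rfl h
  | cons b t => simp [List.intercalate, List.intersperse]

lemma inter_singleton (sep a : List Char) : sep.intercalate [a] = a := by
  simp [List.intercalate]

lemma mySplit_append_ne_nil (c : Char) (pre l : List Char) (rest : List (List Char)) :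
    mySplit c pre l ++ rest ≠ [] := by
  cases hmy : mySplit c pre l with
  | nil => exact absurd hmy (mySplit_ne_nil _ _ _)
  | cons a b => simp

lemma inter_mySplit (c : Char) (pre l : List Char) (rest : List (List Char)) :
    [c].intercalate (mySplit c pre l ++ rest) = [c].intercalate ((pre ++ l) :: rest) := by
  induction l generalizing pre with
  | nil => simp [mySplit]
  | cons x r ih =>
    by_cases hx : x = c
    · subst hx
      have h1 : mySplit x pre (x :: r) = pre :: mySplit x [] r := by simp [mySplit]
      rw [h1, List.cons_append, inter_cons _ _ _ (mySplit_append_ne_nil _ _ _ _), ih []]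
      cases rest with
      | nil =>
        rw [inter_singleton, inter_singleton]
        simp
      | cons z zs =>
        rw [inter_cons [x] ([] ++ r) (z :: zs) (by simp),
          inter_cons [x] (pre ++ x :: r) (z :: zs) (by simp)]
        simp [List.append_assoc]
    · have h1 : mySplit c pre (x :: r) = mySplit c (pre ++ [x]) r := by simp [mySplit, hx]
      rw [h1, ih (pre ++ [x])]
      simp [List.append_assoc]

lemma inter_mySplit_nil (c : Char) (pre l : List Char) :
    [c].intercalate (mySplit c pre l) = pre ++ l := by
  have := inter_mySplit c pre l []
  simpa [inter_singleton] using this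

lemma if_push (b : Bool) (x : List String) (p q : String) :
    (if b then x ++ [p] else x ++ [q]) = x ++ [if b then p else q] := by
  cases b <;> simp

lemma sec_push (v : Option String) (lbl d w : String) (hw : w = lbl ++ d) :
    (if pvTruthy v then lbl ++ v.getD "" else w) = lbl ++ pvOr v d := by
  subst hw
  cases hb : pvTruthy v <;> simp [pvOr, hb]

lemma secE (v : Option String) :
    (if pvTruthy v then "EXAMINATION: " ++ v.getD "" else "EXAMINATION: Not specified.")
      = "EXAMINATION: " ++ pvOr v "Not specified." := sec_push v _ _ _ (by decide)

lemma secI (v : Option String) :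
    (if pvTruthy v then "INDICATION: " ++ v.getD "" else "INDICATION: Not specified.")
      = "INDICATION: " ++ pvOr v "Not specified." := sec_push v _ _ _ (by decide)

lemma secT (v : Option String) :
    (if pvTruthy v then "TECHNIQUE: " ++ v.getD "" else "TECHNIQUE: Not specified.")
      = "TECHNIQUE: " ++ pvOr v "Not specified." := sec_push v _ _ _ (by decide)

lemma secC (v : Option String) :
    (if pvTruthy v then "COMPARISON: " ++ v.getD "" else "COMPARISON: None.")
      = "COMPARISON: " ++ pvOr v "None." := sec_push v _ _ _ (by decide)

lemma splitNL_not_specified : pvSplitNL "Not specified." = ["Not specified."] := by decide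

lemma find_push (v : Option String) (x : List String) :
    (if pvTruthy v then (pvSplitNL (v.getD "")).foldl (fun acc line => acc ++ [line]) x
     else x ++ ["Not specified."]) = x ++ pvSplitNL (pvOr v "Not specified.") := by
  cases hb : pvTruthy v
  · simp [pvOr, hb, splitNL_not_specified]
  · rw [if_pos (by simp [hb]), PySem.List.foldl_append_singleton]
    simp [pvOr, hb]


-- toList of pvSplitNL is the reference splitter
lemma toList_splitNL (s : String) :
    (pvSplitNL s).map String.toList = mySplit '\n' [] s.toList := by
  unfold pvSplitNL
  rw [splitOn_eq_mySplit]
  rw [List.map_map]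
  have : (String.toList ∘ String.ofList) = id := by
    funext cs; simp
  rw [this, List.map_id]

lemma low_exam : PySem.Str.lower "EXAMINATION" = "examination" := by decide
lemma low_ind : PySem.Str.lower "INDICATION" = "indication" := by decide
lemma low_tech : PySem.Str.lower "TECHNIQUE" = "technique" := by decide
lemma low_comp : PySem.Str.lower "COMPARISON" = "comparison" := by decide

-- literal alignment between B's pieces and A's section prefixes
lemma tBe (rest : List Char) :
    "EXAMINATION".toList ++ (": ".toList ++ rest) = "EXAMINATION: ".toList ++ rest := by
  rw [← List.append_assoc, show "EXAMINATION".toList ++ ": ".toList = "EXAMINATION: ".toList from by decide]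
lemma tBi (rest : List Char) :
    "INDICATION".toList ++ (": ".toList ++ rest) = "INDICATION: ".toList ++ rest := by
  rw [← List.append_assoc, show "INDICATION".toList ++ ": ".toList = "INDICATION: ".toList from by decide]
lemma tBt (rest : List Char) :
    "TECHNIQUE".toList ++ (": ".toList ++ rest) = "TECHNIQUE: ".toList ++ rest := by
  rw [← List.append_assoc, show "TECHNIQUE".toList ++ ": ".toList = "TECHNIQUE: ".toList from by decide]
lemma tBc (rest : List Char) :
    "COMPARISON".toList ++ (": ".toList ++ rest) = "COMPARISON: ".toList ++ rest := by
  rw [← List.append_assoc, show "COMPARISON".toList ++ ": ".toList = "COMPARISON: ".toList from by decide]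
lemma tB_wet : ("\nWET READ: ").toList = '\n' :: "WET READ: ".toList := by decide
lemma t_nl : ("\n" : String).toList = ['\n'] := by decide
lemma t_nl2 : ("\n\n" : String).toList = ['\n', '\n'] := by decide
lemma t_emp : ("" : String).toList = [] := by decide

lemma inter_nl_cons_cons (a : List Char) (ls : List (List Char)) (h : ls ≠ []) :
    ['\n'].intercalate (a :: [] :: ls) = a ++ ['\n', '\n'] ++ ['\n'].intercalate ls := by
  rw [inter_cons _ _ _ (by simp), inter_cons _ _ _ h]
  simp

-- the whole tail of the report, computed both ways
lemma tail_calc (e i t c f m : List Char) :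
    ['\n'].intercalate
      (e :: [] :: i :: [] :: t :: [] :: c :: [] :: "FINDINGS:".toList :: [] ::
        (mySplit '\n' [] f ++ ([] :: "IMPRESSION:".toList :: [] :: mySplit '\n' [] m)))
      = ['\n', '\n'].intercalate
          [e, i, t, c, "FINDINGS:".toList, f, "IMPRESSION:".toList, m] := by
  rw [inter_nl_cons_cons _ _ (by simp), inter_nl_cons_cons _ _ (by simp),
    inter_nl_cons_cons _ _ (by simp), inter_nl_cons_cons _ _ (by simp),
    inter_nl_cons_cons _ _ (mySplit_append_ne_nil _ _ _ _),
    inter_mySplit]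
  simp only [List.nil_append]
  rw [inter_nl_cons_cons _ _ (by simp), inter_nl_cons_cons _ _ (mySplit_ne_nil _ _ _),
    inter_mySplit_nil]
  rw [inter_cons _ _ _ (by simp), inter_cons _ _ _ (by simp), inter_cons _ _ _ (by simp),
    inter_cons _ _ _ (by simp), inter_cons _ _ _ (by simp), inter_cons _ _ _ (by simp),
    inter_cons _ _ _ (by simp), inter_singleton]
  simp only [List.nil_append, List.append_assoc]

-- ===== VERDICT (by name: the statement is the Claim_ definition above) =====
theorem json_to_report_spec : Claim_equal_json_to_report := by
  intro sj _
  unfold Spec_json_to_report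
  apply String.ext
  simp only [json_to_report, json_to_report_alt, if_push, secE, secI, secT, secC, find_push,
    List.map_cons, List.map_nil, low_exam, low_ind, low_tech, low_comp]
  cases hw : pvTruthy (List.lookup "wet_read" sj)
  · rw [if_neg (by simp), if_neg (by simp)]
    rw [PySem.Str.toList_join, String.toList_append, String.toList_append, PySem.Str.toList_join]
    simp only [PySem.Chars.join, t_nl, t_nl2, t_emp, String.toList_append, List.map_append,
      List.map_cons, List.map_nil, toList_splitNL, List.cons_append, List.nil_append,
      List.append_assoc, tBe, tBi, tBt, tBc]
    rw [inter_cons _ _ _ (by simp), tail_calc]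
    simp
  · rw [if_pos (by simp), if_pos (by simp)]
    rw [PySem.Str.toList_join, String.toList_append, String.toList_append, PySem.Str.toList_join]
    simp only [PySem.Chars.join, t_nl, t_nl2, t_emp, tB_wet, String.toList_append, List.map_append,
      List.map_cons, List.map_nil, toList_splitNL, List.cons_append, List.nil_append,
      List.append_assoc, tBe, tBi, tBt, tBc]
    rw [inter_cons _ _ _ (by simp), inter_cons _ _ _ (by simp), inter_cons _ _ _ (by simp),
      tail_calc]
    simp [List.append_assoc]
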